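-- pv_equiv track=rewrite | github.com/SabaKathawala/Assignment3_ML | MS-GSP.py | MSSequenceLast
-- ===== SOURCE A (Python) =====
-- def MSSequenceLast(sequence, MS):
--     size = len(sequence)
--     temp = []
--     if size == 1:
--         for each in sequence[0]:
--             temp.append(MS[each])
--     else:
--         for each in sequence:
--             if len(each) == 1:
--                 temp.append(MS[each[0]])
--             else:
--                 for every in each:
--                     temp.append(MS[every])
--
--     if min(temp) == temp[-1]:
--         if temp.count(temp[-1]) == 1:
--             return True
--
--     return False
-- ===== SOURCE B (Python) =====
-- def MSSequenceLast(sequence, MS):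
--     # One fused pass over the flattened sequence: track running min, its count, and last value.
--     best = None
--     cnt = 0
--     last = None
--     for group in sequence:
--         for item in group:
--             v = MS[item]
--             last = v
--             if best is None or v < best:
--                 best = v
--                 cnt = 1
--             elif v == best:
--                 cnt += 1
--     return best is not None and last == best and cnt == 1
-- ===== Notes on version B (the rewrite author's own statement) =====
-- stated objective: alternative
-- what changed: Instead of materialising the temp list of looked-up MS values and then scanning it three times (min, [-1], count), B does one fused pass over the nested sequence maintaining the running minimum, the count of that minimum and the last value seen.
import Mathlib
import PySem

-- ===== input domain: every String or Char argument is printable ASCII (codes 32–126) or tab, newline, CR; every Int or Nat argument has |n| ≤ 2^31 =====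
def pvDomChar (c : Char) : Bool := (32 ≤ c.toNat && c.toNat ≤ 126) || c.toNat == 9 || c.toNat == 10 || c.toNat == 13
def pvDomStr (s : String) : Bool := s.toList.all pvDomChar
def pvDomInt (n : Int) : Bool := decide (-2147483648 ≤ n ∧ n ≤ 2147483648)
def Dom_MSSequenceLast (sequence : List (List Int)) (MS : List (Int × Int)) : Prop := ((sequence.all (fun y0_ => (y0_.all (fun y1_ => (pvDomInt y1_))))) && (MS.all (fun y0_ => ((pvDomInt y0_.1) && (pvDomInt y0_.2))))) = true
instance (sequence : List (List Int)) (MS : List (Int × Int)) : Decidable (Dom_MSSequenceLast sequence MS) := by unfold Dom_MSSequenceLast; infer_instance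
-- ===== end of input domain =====

-- B fuses the flatten and the min/count/last scans into one pass (objective: simpler/alternative).

-- ===== PORT A =====
-- temp is built exactly as in A (size==1 branch, len(each)==1 branch); MS[each] is a dict
-- lookup, so a missing key (KeyError) makes temp? = none, and min([])/[-1] on empty temp
-- (ValueError) is the `none` getLast?/min? case; both are excluded by Pre_.
def MSSequenceLast (sequence : List (List Int)) (MS : List (Int × Int)) : Bool :=
  let temp? : Option (List Int) :=
    if sequence.length = 1 then
      ((PySem.List.pyGet? sequence 0).getD []).foldlM
        (fun (acc : List Int) each => ((PySem.Dict.mk MS).get? each).map (fun v => acc ++ [v])) []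
    else
      sequence.foldlM (fun (acc : List Int) each =>
        if each.length = 1 then
          ((PySem.Dict.mk MS).get? ((PySem.List.pyGet? each 0).getD 0)).map (fun v => acc ++ [v])
        else
          each.foldlM (fun (acc2 : List Int) every =>
            ((PySem.Dict.mk MS).get? every).map (fun v => acc2 ++ [v])) acc) []
  match temp? with
  | none => false
  | some temp =>
    match PySem.List.min? temp (fun x => x), temp.getLast? with
    | some m, some last =>
      if m = last then (if (PySem.List.count temp last : Int) = 1 then true else false) else false
    | _, _ => false

-- ===== PORT B =====
-- state = (best, cnt, last); a missing key is a KeyError in Python B (excluded by Pre_),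
-- the port leaves the state unchanged there.
def pvAltStep (MS : List (Int × Int)) (st : Option Int × Int × Option Int)
    (item : Int) : Option Int × Int × Option Int :=
  match (PySem.Dict.mk MS).get? item with
  | none => st
  | some v =>
    match st with
    | (none, _, _) => (some v, 1, some v)
    | (some b, cnt, _) =>
      if v < b then (some v, 1, some v)
      else if v = b then (some b, cnt + 1, some v)
      else (some b, cnt, some v)

def MSSequenceLast_alt (sequence : List (List Int)) (MS : List (Int × Int)) : Bool :=
  let st := sequence.foldl (fun st group => group.foldl (pvAltStep MS) st)
      ((none : Option Int), (0 : Int), (none : Option Int))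
  -- 'best is not None and last == best and cnt == 1'
  match st.1 with
  | none => false
  | some b => decide (st.2.2 = some b) && decide (st.2.1 = 1)

-- ===== PRECONDITION & SPEC =====
-- Pre_ excludes exactly the inputs where A raises: an empty flattened sequence
-- (min([]) is a ValueError) and an item missing from MS (KeyError).
def Pre_MSSequenceLast (sequence : List (List Int)) (MS : List (Int × Int)) : Prop :=
  sequence.flatten ≠ [] ∧ ∀ x ∈ sequence.flatten, ((PySem.Dict.mk MS).get? x).isSome = true
instance (sequence : List (List Int)) (MS : List (Int × Int)) : Decidable (Pre_MSSequenceLast sequence MS) := by unfold Pre_MSSequenceLast; infer_instance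
def pvWitness_MSSequenceLast : List (List Int) × (List (Int × Int)) := ([[0], [1, 0]], [(0, 5), (1, 2)])

def Spec_MSSequenceLast (sequence : List (List Int)) (MS : List (Int × Int)) (out : Bool) : Prop := out = MSSequenceLast_alt sequence MS
instance (sequence : List (List Int)) (MS : List (Int × Int)) (out : Bool) : Decidable (Spec_MSSequenceLast sequence MS out) := by unfold Spec_MSSequenceLast; infer_instance

-- ===== CLAIM (what is proved, stated in full; the proofs are below) =====
def Claim_equal_MSSequenceLast : Prop := ∀ (sequence : List (List Int)) (MS : List (Int × Int)), Dom_MSSequenceLast sequence MS → Pre_MSSequenceLast sequence MS → Spec_MSSequenceLast sequence MS (MSSequenceLast sequence MS)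

-- ===== LEMMAS AND PROOFS =====

-- the looked-up MS value under Pre_ (the default is never used inside Pre_)
def pvF (MS : List (Int × Int)) (x : Int) : Int := ((PySem.Dict.mk MS).get? x).getD 0

-- A's tail on the collected temp list
def pvATail (temp : List Int) : Bool :=
  match PySem.List.min? temp (fun x => x), temp.getLast? with
  | some m, some last =>
    if m = last then (if (PySem.List.count temp last : Int) = 1 then true else false) else false
  | _, _ => false

-- B's pure step, once the lookup succeeded
def pvPStep (st : Option Int × Int × Option Int) (v : Int) : Option Int × Int × Option Int :=
  match st with
  | (none, _, _) => (some v, 1, some v)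
  | (some b, cnt, _) =>
    if v < b then (some v, 1, some v)
    else if v = b then (some b, cnt + 1, some v)
    else (some b, cnt, some v)

lemma pvFoldlM_inner (MS : List (Int × Int)) (l : List Int) (acc : List Int)
    (h : ∀ x ∈ l, ((PySem.Dict.mk MS).get? x).isSome = true) :
    l.foldlM (fun (acc2 : List Int) every =>
      ((PySem.Dict.mk MS).get? every).map (fun v => acc2 ++ [v])) acc
      = some (acc ++ l.map (pvF MS)) := by
  induction l generalizing acc with
  | nil => simp
  | cons a t ih =>
    obtain ⟨v, hv⟩ := Option.isSome_iff_exists.mp (h a (by simp))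
    simp only [List.foldlM_cons, hv, Option.map_some, Option.bind_eq_bind, Option.bind_some,
      List.map_cons]
    rw [ih _ (fun x hx => h x (by simp [hx]))]
    simp [pvF, hv]

lemma pvFoldlM_outer (MS : List (Int × Int)) (seq : List (List Int)) (acc : List Int)
    (h : ∀ x ∈ seq.flatten, ((PySem.Dict.mk MS).get? x).isSome = true) :
    seq.foldlM (fun (acc : List Int) each =>
      if each.length = 1 then
        ((PySem.Dict.mk MS).get? ((PySem.List.pyGet? each 0).getD 0)).map (fun v => acc ++ [v])
      else
        each.foldlM (fun (acc2 : List Int) every =>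
          ((PySem.Dict.mk MS).get? every).map (fun v => acc2 ++ [v])) acc) acc
      = some (acc ++ seq.flatten.map (pvF MS)) := by
  induction seq generalizing acc with
  | nil => simp
  | cons g rest ih =>
    have hg : ∀ x ∈ g, ((PySem.Dict.mk MS).get? x).isSome = true := by
      intro x hx; exact h x (by simp [hx])
    have hrest : ∀ x ∈ rest.flatten, ((PySem.Dict.mk MS).get? x).isSome = true := by
      intro x hx; exact h x (by simp [hx])
    by_cases hlen : g.length = 1
    · match g, hlen with
      | [a], _ =>
        obtain ⟨v, hv⟩ := Option.isSome_iff_exists.mp (hg a (by simp))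
        have hget : ((PySem.List.pyGet? [a] 0).getD 0 : Int) = a := by
          simp [PySem.List.pyGet?, PySem.List.pyIdx?]
        rw [List.foldlM_cons, if_pos (by simp : ([a] : List Int).length = 1), hget, hv]
        simp only [Option.map_some, Option.bind_eq_bind, Option.bind_some]
        rw [ih _ hrest]
        have hfa : pvF MS a = v := by simp [pvF, hv]
        simp [hfa]
    · rw [List.foldlM_cons, if_neg hlen]
      rw [pvFoldlM_inner MS g acc hg]
      simp only [Option.bind_eq_bind, Option.bind_some]
      rw [ih _ hrest]
      simp

lemma pvA_eq_aTail (sequence : List (List Int)) (MS : List (Int × Int))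
    (h : ∀ x ∈ sequence.flatten, ((PySem.Dict.mk MS).get? x).isSome = true) :
    MSSequenceLast sequence MS = pvATail (sequence.flatten.map (pvF MS)) := by
  unfold MSSequenceLast
  by_cases hlen : sequence.length = 1
  · match sequence, hlen with
    | [g], _ =>
      rw [if_pos (by simp : ([g] : List (List Int)).length = 1)]
      have : (PySem.List.pyGet? [g] 0).getD [] = g := by
        simp [PySem.List.pyGet?, PySem.List.pyIdx?]
      rw [this, pvFoldlM_inner MS g [] (by intro x hx; exact h x (by simpa using hx))]
      simp [pvATail]
  · simp only [if_neg hlen]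
    rw [pvFoldlM_outer MS sequence [] h]
    simp [pvATail]

lemma pvGetLast?_cons (v : Int) (t : List Int) :
    ((v :: t).getLast?) = Option.or t.getLast? (some v) := by
  cases t with
  | nil => simp
  | cons x xs =>
    have : (x :: xs).getLast?.isSome := by simp
    obtain ⟨y, hy⟩ := Option.isSome_iff_exists.mp this
    rw [List.getLast?_cons_cons, hy]
    simp [Option.or]

lemma pvFoldl_min_le (t : List Int) (b : Int) : t.foldl min b ≤ b := by
  induction t generalizing b with
  | nil => simp
  | cons a s ih => exact le_trans (ih (min b a)) (min_le_left b a)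

lemma pvOr_getLast_cons (v : Int) (s : List Int) (lo : Option Int) :
    Option.or ((v :: s).getLast?) lo = (v :: s).getLast? := by
  obtain ⟨y, hy⟩ := Option.isSome_iff_exists.mp
    (by simp : ((v :: s).getLast?).isSome = true)
  rw [hy]
  rfl

lemma pvPStep_inv (t : List Int) (b : Int) (c : Int) (lo : Option Int) :
    t.foldl pvPStep (some b, c, lo)
      = (some (t.foldl min b),
         (if t.foldl min b = b then c else 0) + (t.count (t.foldl min b) : Int),
         Option.or t.getLast? lo) := by
  induction t generalizing b c lo with
  | nil => simp
  | cons v s ih =>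
    rcases lt_trichotomy v b with hvb | hvb | hvb
    · have hstep : pvPStep (some b, c, lo) v = (some v, 1, some v) := by
        simp [pvPStep, hvb]
      have hmin : min b v = v := by omega
      have hle : s.foldl min v ≤ v := pvFoldl_min_le s v
      rw [List.foldl_cons, hstep, ih, show (v :: s).foldl min b = s.foldl min (min b v) from rfl,
        hmin, ← pvGetLast?_cons v s]
      simp only [Prod.mk.injEq]
      refine ⟨trivial, ?_, (pvOr_getLast_cons v s lo).symm⟩
      simp only [List.count_cons, beq_iff_eq]
      split_ifs <;> push_cast <;> omega
    · subst hvb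
      have hstep : pvPStep (some v, c, lo) v = (some v, c + 1, some v) := by
        simp [pvPStep]
      have hmin : min v v = v := by omega
      rw [List.foldl_cons, hstep, ih, show (v :: s).foldl min v = s.foldl min (min v v) from rfl,
        hmin, ← pvGetLast?_cons v s]
      simp only [Prod.mk.injEq]
      refine ⟨trivial, ?_, (pvOr_getLast_cons v s lo).symm⟩
      simp only [List.count_cons, beq_iff_eq]
      split_ifs <;> push_cast <;> omega
    · have hstep : pvPStep (some b, c, lo) v = (some b, c, some v) := by
        have h1 : ¬ v < b := by omega
        have h2 : ¬ v = b := by omega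
        simp [pvPStep, h1, h2]
      have hmin : min b v = b := by omega
      have hle : s.foldl min b ≤ b := pvFoldl_min_le s b
      rw [List.foldl_cons, hstep, ih, show (v :: s).foldl min b = s.foldl min (min b v) from rfl,
        hmin, ← pvGetLast?_cons v s]
      simp only [Prod.mk.injEq]
      refine ⟨trivial, ?_, (pvOr_getLast_cons v s lo).symm⟩
      simp only [List.count_cons, beq_iff_eq]
      split_ifs <;> push_cast <;> omega

lemma pvB_fold (MS : List (Int × Int)) (l : List Int)
    (st : Option Int × Int × Option Int)
    (h : ∀ x ∈ l, ((PySem.Dict.mk MS).get? x).isSome = true) :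
    l.foldl (pvAltStep MS) st = (l.map (pvF MS)).foldl pvPStep st := by
  induction l generalizing st with
  | nil => rfl
  | cons a t ih =>
    obtain ⟨v, hv⟩ := Option.isSome_iff_exists.mp (h a (by simp))
    have hstep : pvAltStep MS st a = pvPStep st (pvF MS a) := by
      simp [pvAltStep, pvPStep, hv, pvF]
    rw [List.foldl_cons, hstep, List.map_cons, List.foldl_cons]
    exact ih _ (fun x hx => h x (by simp [hx]))

lemma pvB_eq (sequence : List (List Int)) (MS : List (Int × Int))
    (h : ∀ x ∈ sequence.flatten, ((PySem.Dict.mk MS).get? x).isSome = true) :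
    MSSequenceLast_alt sequence MS
      = (let st := (sequence.flatten.map (pvF MS)).foldl pvPStep
            ((none : Option Int), (0 : Int), (none : Option Int))
         match st.1 with
         | none => false
         | some b => decide (st.2.2 = some b) && decide (st.2.1 = 1)) := by
  unfold MSSequenceLast_alt
  rw [← List.foldl_flatten, pvB_fold MS sequence.flatten _ h]

-- ===== VERDICT (by name: the statement is the Claim_ definition above) =====
theorem MSSequenceLast_spec : Claim_equal_MSSequenceLast := by
  intro sequence MS _ hpre
  obtain ⟨hne, hkeys⟩ := hpre
  unfold Spec_MSSequenceLast
  rw [pvA_eq_aTail sequence MS hkeys, pvB_eq sequence MS hkeys]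
  obtain ⟨h, rest, htemp⟩ : ∃ h rest, sequence.flatten.map (pvF MS) = h :: rest := by
    cases hfl : sequence.flatten with
    | nil => exact absurd hfl hne
    | cons a t => exact ⟨pvF MS a, t.map (pvF MS), by simp⟩
  rw [htemp]
  have hstart : (h :: rest).foldl pvPStep ((none : Option Int), (0 : Int), (none : Option Int))
      = rest.foldl pvPStep (some h, 1, some h) := rfl
  simp only [hstart, pvPStep_inv]
  set m := rest.foldl min h with hmdef
  have hmin? : PySem.List.min? (h :: rest) (fun x => x) = some m :=
    PySem.List.min?_id_cons h rest
  have hlast : (h :: rest).getLast? = Option.or rest.getLast? (some h) :=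
    pvGetLast?_cons h rest
  obtain ⟨l, hl⟩ : ∃ l, Option.or rest.getLast? (some h) = some l := by
    cases rest.getLast? <;> simp [Option.or]
  have hcnt : (if m = h then (1 : Int) else 0) + (rest.count m : Int)
      = ((h :: rest).count m : Int) := by
    simp only [List.count_cons, beq_iff_eq]
    split_ifs <;> push_cast <;> omega
  unfold pvATail
  rw [hmin?, hlast, hl, hcnt]
  simp only [PySem.List.count_eq, Option.some.injEq]
  by_cases hml : m = l
  · rw [← hml]
    by_cases hc : ((List.count m (h :: rest) : Int)) = 1
    · simp [hc]
    · simp [hc]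
  · simp [hml, Ne.symm hml]
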